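-- pv_equiv track=rewrite | github.com/jonas-mika/itu | semester 1/assignments/assignment7/pascal.py | search_pascal_multiples_slow
-- ===== SOURCE A (Python) =====
-- def search_pascal_multiples_slow(row_limit):
--
--     # Building up Pascal's triangle with a dict of lists
--     ptriangle = {}
--     ptriangle[0] = [1]
--     ptriangle[1] = [1,1]
--     ptriangle[2] = [1,2,1]
--     for r in range(3, row_limit):
--         ptriangle[r] = []
--         for i in range(len(ptriangle[r-1])+1):
--             if i == 0: # on left border, so we just add 1
--                 ptriangle[r].append(1)
--             elif i == len(ptriangle[r-1]): # on right border, so we just add 1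
--                 ptriangle[r].append(1)
--             else: # not on border, so we sum up the two numbers above
--                 ptriangle[r].append(ptriangle[r-1][i-1] + ptriangle[r-1][i])
--
--     # Putting all numbers into one list, except the outermost 2 numbers in each row
--     number_list = []
--     for r in range(row_limit):
--         row = ptriangle[r]
--         for i, number in enumerate(row):
--             if i > 1 and i < len(row)-1: # exclude the outermost 2 numbers in each row
--                 number_list.append(number)
--
--     # Counting the numbers
--     number_set = set(number_list)
--     pascal_multiples = []
--     for unique_number in number_set:
--         count = 0
--         for number in number_list:
--             if number == unique_number:
--                 count = count + 1
--         if count > 3: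
--             pascal_multiples.append(unique_number)
--
--     return sorted(pascal_multiples)
-- ===== SOURCE B (Python) =====
-- def search_pascal_multiples_slow(row_limit):
--     # Closed-form rows: walk each row's interior with the multiplicative
--     # binomial recurrence C(r,i) = C(r,i-1)*(r-i+1)//i, counting on the fly.
--     counts = {}
--     for r in range(row_limit):
--         c = r  # C(r, 1)
--         for i in range(2, r):
--             c = c * (r - i + 1) // i
--             counts[c] = counts.get(c, 0) + 1
--     return sorted(n for n, k in counts.items() if k > 3)
-- ===== Notes on version B (the rewrite author's own statement) =====
-- stated objective: faster
-- what changed: Replaces the stored dict-of-lists Pascal triangle plus a quadratic per-unique-value counting scan by direct closed-form binomials (multiplicative recurrence per row) counted on the fly in a dict.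
import Mathlib
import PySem

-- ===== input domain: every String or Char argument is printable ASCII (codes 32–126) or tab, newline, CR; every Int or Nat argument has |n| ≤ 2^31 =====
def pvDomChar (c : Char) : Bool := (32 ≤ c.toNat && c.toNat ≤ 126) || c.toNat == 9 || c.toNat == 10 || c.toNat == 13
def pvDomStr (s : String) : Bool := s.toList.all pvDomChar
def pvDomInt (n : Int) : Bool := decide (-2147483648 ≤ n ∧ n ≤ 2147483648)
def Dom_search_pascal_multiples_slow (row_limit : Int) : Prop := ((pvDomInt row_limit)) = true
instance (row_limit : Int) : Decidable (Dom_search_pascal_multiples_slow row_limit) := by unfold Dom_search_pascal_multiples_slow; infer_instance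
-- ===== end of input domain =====

-- B computes each pvInterior Pascal value directly by the multiplicative binomial recurrence
-- and counts in a dict as it goes, instead of storing the whole triangle and re-scanning the
-- value list once per unique value (objective: faster).

-- ===== PORT A =====
-- Dict reads ptriangle[k] are ported as getD _ []: every key A reads is present (rows 0..2 are
-- preseeded, later rows are inserted before being read), so the default is never used — exact.
-- List indexing ptriangle[r-1][i-1] / [i] is ported as pyGetD _ _ 0: always in range — exact.
-- A iterates over a Python set only to feed sorted() with distinct elements, so the result
-- does not depend on the set's hash order; the port iterates PySem.Set in insertion order.
def search_pascal_multiples_slow (row_limit : Int) : List Int :=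
  let pt0 : PySem.Dict Int (List Int) :=
    ((PySem.Dict.empty.insert 0 [1]).insert 1 [1, 1]).insert 2 [1, 2, 1]
  let pt :=
    (PySem.List.pyRange 3 row_limit 1).foldl (fun pt r =>
      let pt := pt.insert r []
      (PySem.List.pyRange 0 (PySem.List.len (pt.getD (r - 1) []) + 1) 1).foldl
        (fun pt i =>
          if i == 0 then pt.insert r (pt.getD r [] ++ [1])
          else if i == PySem.List.len (pt.getD (r - 1) []) then
            pt.insert r (pt.getD r [] ++ [1])
          else
            pt.insert r (pt.getD r [] ++
              [PySem.List.pyGetD (pt.getD (r - 1) []) (i - 1) 0 +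
               PySem.List.pyGetD (pt.getD (r - 1) []) i 0])) pt) pt0
  let number_list :=
    (PySem.List.pyRange 0 row_limit 1).foldl (fun nl r =>
      let row := pt.getD r []
      (PySem.List.enumerate row).foldl (fun nl p =>
        if 1 < p.1 ∧ p.1 < PySem.List.len row - 1 then nl ++ [p.2] else nl) nl) []
  let number_set : PySem.Set Int := PySem.Set.ofList number_list
  let pascal_multiples :=
    number_set.foldl (fun pm u =>
      let count := number_list.foldl (fun c n => if n == u then c + 1 else c) (0 : Int)
      if count > 3 then pm ++ [u] else pm) []
  PySem.List.sorted pascal_multiples (fun x => x) false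

-- ===== PORT B =====
def search_pascal_multiples_slow_alt (row_limit : Int) : List Int :=
  let counts : PySem.Dict Int Int :=
    (PySem.List.pyRange 0 row_limit 1).foldl (fun counts r =>
      ((PySem.List.pyRange 2 r 1).foldl
        (fun (s : Int × PySem.Dict Int Int) i =>
          let c := PySem.Int.floordiv (s.1 * (r - i + 1)) i
          (c, s.2.insert c (s.2.getD c 0 + 1))) (r, counts)).2) PySem.Dict.empty
  PySem.List.sorted ((counts.items.filter (fun p => p.2 > 3)).map (fun p => p.1))
    (fun x => x) false

-- ===== PRECONDITION & SPEC =====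
def Spec_search_pascal_multiples_slow (row_limit : Int) (out : List Int) : Prop := out = search_pascal_multiples_slow_alt row_limit
instance (row_limit : Int) (out : List Int) : Decidable (Spec_search_pascal_multiples_slow row_limit out) := by unfold Spec_search_pascal_multiples_slow; infer_instance

-- ===== CLAIM (what is proved, stated in full; the proofs are below) =====
def Claim_equal_search_pascal_multiples_slow : Prop := ∀ (row_limit : Int), Dom_search_pascal_multiples_slow row_limit → Spec_search_pascal_multiples_slow row_limit (search_pascal_multiples_slow row_limit)

-- ===== LEMMAS AND PROOFS =====

-- C(n, i) as an Int, with an Int second argument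
def chI (n : Nat) (i : Int) : Int := (n.choose i.toNat : Int)

-- the interior values of row r (indices 2 .. r-1), in order
def pvInterior (r : Int) : List Int := (PySem.List.pyRange 2 r 1).map (chI r.toNat)

-- the stream of interior values over all rows below rl, in generation order
def pvNums (rl : Int) : List Int := (PySem.List.pyRange 0 rl 1).flatMap pvInterior

-- Pascal row n
def pasRow (n : Nat) : List Int := (List.range (n + 1)).map (fun i => (n.choose i : Int))

lemma pasRow_getD (n j : Nat) (d : Int) (h : j ≤ n) :
    (pasRow n).getD j d = (n.choose j : Int) := by
  rw [pasRow, List.getD_eq_getElem?_getD, List.getElem?_map]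
  simp [List.getElem?_range (by omega : j < n + 1)]

lemma choose_mul_step (n : Nat) (k : Int) (h2 : 2 ≤ k) (hk : k ≤ (n : Int)) :
    PySem.Int.floordiv (chI n (k - 1) * ((n : Int) - k + 1)) k = chI n k := by
  obtain ⟨j, rfl⟩ : ∃ j : Nat, k = (j : Int) := ⟨k.toNat, by omega⟩
  have hj2 : 2 ≤ j := by exact_mod_cast h2
  have hjn : j ≤ n := by exact_mod_cast hk
  have h1 : chI n ((j : Int) - 1) = (n.choose (j - 1) : Int) := by
    unfold chI
    have : ((j : Int) - 1).toNat = j - 1 := by omega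
    rw [this]
  have h2' : (n : Int) - j + 1 = ((n - j + 1 : Nat) : Int) := by omega
  have hmul : n.choose (j - 1) * (n - j + 1) = n.choose j * j := by
    have h := Nat.choose_succ_right_eq n (j - 1)
    have hj : j - 1 + 1 = j := by omega
    rw [hj] at h
    rw [h]; congr 1; omega
  have h3 : ((j : Int)).toNat = j := by omega
  rw [h1, h2', ← Nat.cast_mul, hmul, Nat.cast_mul, chI, h3]
  rw [← Nat.cast_mul, PySem.Int.floordiv_natCast]
  rw [Nat.mul_div_cancel _ (by omega : 0 < j)]

lemma pasRow_getElem? (n j : Nat) (h : j ≤ n) : (pasRow n)[j]? = some (n.choose j : Int) := by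
  rw [pasRow, List.getElem?_map, List.getElem?_range (by omega : j < n + 1)]; rfl

lemma pasRow_take_succ (n j : Nat) (h : j ≤ n) :
    (pasRow n).take j ++ [(n.choose j : Int)] = (pasRow n).take (j + 1) := by
  rw [List.take_add_one, pasRow_getElem? n j h]; rfl

lemma build_row_gen (r : Int) (hr : 3 ≤ r) (d : PySem.Dict Int (List Int))
    (hprev : d.getD (r - 1) [] = pasRow (r.toNat - 1)) (j : Nat) (hj : j ≤ r.toNat + 1) :
    ((PySem.List.pyRange (j : Int) ((r.toNat : Int) + 1) 1).foldl
      (fun pt i =>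
        if i == 0 then pt.insert r (pt.getD r [] ++ [1])
        else if i == PySem.List.len (pt.getD (r - 1) []) then
          pt.insert r (pt.getD r [] ++ [1])
        else
          pt.insert r (pt.getD r [] ++
            [PySem.List.pyGetD (pt.getD (r - 1) []) (i - 1) 0 +
             PySem.List.pyGetD (pt.getD (r - 1) []) i 0]))
      (d.insert r ((pasRow r.toNat).take j))) = d.insert r (pasRow r.toNat) := by
  set n := r.toNat with hn
  have hn3 : 3 ≤ n := by omega
  by_cases hend : j = n + 1
  · subst hend
    rw [PySem.List.pyRange_one_eq_nil (by omega), List.foldl_nil,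
      List.take_of_length_le (by simp [pasRow])]
  · have hjn : j < n + 1 := by omega
    rw [PySem.List.pyRange_one_cons (by omega : (j : Int) < (n : Int) + 1), List.foldl_cons]
    have hne : r - 1 ≠ r := by omega
    have hprev' : ((d.insert r ((pasRow n).take j)).getD (r - 1) []) = pasRow (n - 1) := by
      rw [PySem.Dict.getD_insert_of_ne _ _ _ hne, hprev]
    have hself : ((d.insert r ((pasRow n).take j)).getD r []) = (pasRow n).take j :=
      PySem.Dict.getD_insert_self _ _ _ _
    have hlen : PySem.List.len (pasRow (n - 1)) = (n : Int) := by
      simp [pasRow]; omega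
    have hstep : (if ((j:Int)) == 0 then
          (d.insert r ((pasRow n).take j)).insert r
            (((d.insert r ((pasRow n).take j)).getD r []) ++ [1])
        else if ((j:Int)) == PySem.List.len (((d.insert r ((pasRow n).take j)).getD (r - 1) [])) then
          (d.insert r ((pasRow n).take j)).insert r
            (((d.insert r ((pasRow n).take j)).getD r []) ++ [1])
        else
          (d.insert r ((pasRow n).take j)).insert r
            (((d.insert r ((pasRow n).take j)).getD r []) ++
              [PySem.List.pyGetD (((d.insert r ((pasRow n).take j)).getD (r - 1) [])) ((j:Int) - 1) 0 +
               PySem.List.pyGetD (((d.insert r ((pasRow n).take j)).getD (r - 1) [])) ((j:Int)) 0]))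
        = d.insert r ((pasRow n).take (j + 1)) := by
      rw [hprev', hself, hlen]
      by_cases hj0 : j = 0
      · subst hj0
        simp only [Nat.cast_zero, beq_self_eq_true, if_true, PySem.Dict.insert_insert_self]
        have h1 : (pasRow n).take 0 ++ [(1:Int)] = (pasRow n).take 1 := by
          have := pasRow_take_succ n 0 (by omega)
          norm_num at this
          exact this
        norm_num at h1 ⊢
        rw [h1]
      · have h0 : ((j:Int) == 0) = false := by simp; omega
        rw [h0, if_neg (by simp)]
        by_cases hjn' : j = n
        · subst hjn'
          rw [if_pos (by simp), PySem.Dict.insert_insert_self]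
          have h1 := pasRow_take_succ n n (le_refl n)
          rw [Nat.choose_self] at h1
          norm_num at h1 ⊢
          rw [h1]
        · have hne2 : (((j:Int)) == ((n:Int))) = false := by simp; omega
          rw [hne2, if_neg (by simp), PySem.Dict.insert_insert_self]
          have hg1 : PySem.List.pyGetD (pasRow (n - 1)) ((j:Int) - 1) 0 = ((n-1).choose (j-1) : Int) := by
            have hc : ((j:Int) - 1) = (((j - 1 : Nat) : Int)) := by omega
            rw [hc, PySem.List.pyGetD_natCast, pasRow_getD _ _ _ (by omega)]
          have hg2 : PySem.List.pyGetD (pasRow (n - 1)) ((j:Int)) 0 = ((n-1).choose j : Int) := by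
            rw [PySem.List.pyGetD_natCast, pasRow_getD _ _ _ (by omega)]
          rw [hg1, hg2]
          have hsum : ((n-1).choose (j-1) : Int) + ((n-1).choose j : Int) = (n.choose j : Int) := by
            rw [← Nat.cast_add]
            congr 1
            have h := Nat.choose_succ_succ' (n - 1) (j - 1)
            have e1 : n - 1 + 1 = n := by omega
            have e2 : j - 1 + 1 = j := by omega
            rw [e2, e1] at h
            rw [h]
          rw [hsum, pasRow_take_succ n j (by omega)]
    rw [hstep]
    have := build_row_gen r hr d hprev (j + 1) (by omega)
    have hc : ((j:Int)) + 1 = (((j+1 : Nat)) : Int) := by omega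
    rw [hc]
    exact this
termination_by r.toNat + 1 - j
decreasing_by omega

lemma alt_inner_gen (r : Int) (hr : 0 ≤ r) (k : Int) (h2 : 2 ≤ k) (d : PySem.Dict Int Int) :
    ((PySem.List.pyRange k r 1).foldl
      (fun (s : Int × PySem.Dict Int Int) i =>
        let c := PySem.Int.floordiv (s.1 * (r - i + 1)) i
        (c, s.2.insert c (s.2.getD c 0 + 1))) (chI r.toNat (k - 1), d)).2 =
    ((PySem.List.pyRange k r 1).map (chI r.toNat)).foldl
      (fun d x => d.insert x (d.getD x 0 + 1)) d := by
  by_cases h : r ≤ k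
  · rw [PySem.List.pyRange_one_eq_nil h]; rfl
  · have h := lt_of_not_ge h
    rw [PySem.List.pyRange_one_cons h]
    have hstep : PySem.Int.floordiv (chI r.toNat (k - 1) * (r - k + 1)) k = chI r.toNat k := by
      have : ((r.toNat : Nat) : Int) = r := by omega
      rw [← this]
      exact choose_mul_step r.toNat k h2 (by omega)
    simp only [List.foldl_cons, List.map_cons, hstep]
    have := alt_inner_gen r hr (k + 1) (by omega) (d.insert (chI r.toNat k) (d.getD (chI r.toNat k) 0 + 1))
    have hk1 : k + 1 - 1 = k := by ring
    rw [hk1] at this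
    exact this
termination_by (r - k).toNat
decreasing_by omega

lemma alt_inner (r : Int) (hr : 0 ≤ r) (d : PySem.Dict Int Int) :
    ((PySem.List.pyRange 2 r 1).foldl
      (fun (s : Int × PySem.Dict Int Int) i =>
        let c := PySem.Int.floordiv (s.1 * (r - i + 1)) i
        (c, s.2.insert c (s.2.getD c 0 + 1))) (r, d)).2 =
    (pvInterior r).foldl (fun d x => d.insert x (d.getD x 0 + 1)) d := by
  by_cases h : r ≤ 2
  · rw [pvInterior, PySem.List.pyRange_one_eq_nil h]; rfl
  · have h := lt_of_not_ge h
    have hr1 : chI r.toNat (2 - 1) = r := by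
      unfold chI
      have : ((2:Int) - 1).toNat = 1 := by decide
      rw [this, Nat.choose_one_right]; omega
    rw [pvInterior, ← alt_inner_gen r hr 2 (by omega) d, hr1]

lemma build_row (r : Int) (hr : 3 ≤ r) (d : PySem.Dict Int (List Int))
    (hprev : d.getD (r - 1) [] = pasRow (r.toNat - 1)) (k : Int) :
    ((PySem.List.pyRange 0 (PySem.List.len ((d.insert r []).getD (r - 1) []) + 1) 1).foldl
      (fun pt i =>
        if i == 0 then pt.insert r (pt.getD r [] ++ [1])
        else if i == PySem.List.len (pt.getD (r - 1) []) then
          pt.insert r (pt.getD r [] ++ [1])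
        else
          pt.insert r (pt.getD r [] ++
            [PySem.List.pyGetD (pt.getD (r - 1) []) (i - 1) 0 +
             PySem.List.pyGetD (pt.getD (r - 1) []) i 0])) (d.insert r [])).getD k [] =
    if k = r then pasRow r.toNat else d.getD k [] := by
  set n := r.toNat with hn
  have hn3 : 3 ≤ n := by omega
  have hb : PySem.List.len ((d.insert r []).getD (r - 1) []) + 1 = (n : Int) + 1 := by
    rw [PySem.Dict.getD_insert_of_ne _ _ _ (by omega : r - 1 ≠ r), hprev]
    simp [pasRow]
    omega
  have h0 : d.insert r [] = d.insert r ((pasRow n).take 0) := by simp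
  rw [hb, h0]
  have h1 := build_row_gen r hr d hprev 0 (by omega)
  simp only [Nat.cast_zero] at h1
  rw [h1, PySem.Dict.getD_insert]

lemma build_getD (rl : Int) (k : Int) :
    ((PySem.List.pyRange 3 rl 1).foldl (fun pt r =>
      let pt := pt.insert r []
      (PySem.List.pyRange 0 (PySem.List.len (pt.getD (r - 1) []) + 1) 1).foldl
        (fun pt i =>
          if i == 0 then pt.insert r (pt.getD r [] ++ [1])
          else if i == PySem.List.len (pt.getD (r - 1) []) then
            pt.insert r (pt.getD r [] ++ [1])
          else
            pt.insert r (pt.getD r [] ++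
              [PySem.List.pyGetD (pt.getD (r - 1) []) (i - 1) 0 +
               PySem.List.pyGetD (pt.getD (r - 1) []) i 0])) pt)
      (((PySem.Dict.empty.insert 0 [1]).insert 1 [1, 1]).insert 2 [1, 2, 1])).getD k []
    = if 0 ≤ k ∧ k < max 3 rl then pasRow k.toNat else [] := by
  by_cases h : rl ≤ 3
  · rw [PySem.List.pyRange_one_eq_nil h, List.foldl_nil]
    rw [PySem.Dict.getD_insert, PySem.Dict.getD_insert, PySem.Dict.getD_insert,
      PySem.Dict.getD_empty]
    have hmax : max 3 rl = 3 := by omega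
    rw [hmax]
    by_cases h2 : k = 2
    · subst h2; decide
    · by_cases h1 : k = 1
      · subst h1; decide
      · by_cases h0 : k = 0
        · subst h0; decide
        · rw [if_neg h2, if_neg h1, if_neg h0, if_neg (by omega)]
  · have h3 : (3:Int) ≤ rl - 1 := by omega
    have hsplit : PySem.List.pyRange 3 rl 1 = PySem.List.pyRange 3 (rl - 1) 1 ++ [rl - 1] := by
      have h4 := PySem.List.pyRange_one_succ_right h3
      have e : rl - 1 + 1 = rl := by ring
      rw [e] at h4
      exact h4
    rw [hsplit, List.foldl_append, List.foldl_cons, List.foldl_nil]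
    have hprev := build_getD (rl - 1) (rl - 1 - 1)
    rw [if_pos (by constructor <;> omega)] at hprev
    have hprev' : ((PySem.List.pyRange 3 (rl - 1) 1).foldl (fun pt r =>
        let pt := pt.insert r []
        (PySem.List.pyRange 0 (PySem.List.len (pt.getD (r - 1) []) + 1) 1).foldl
          (fun pt i =>
            if i == 0 then pt.insert r (pt.getD r [] ++ [1])
            else if i == PySem.List.len (pt.getD (r - 1) []) then
              pt.insert r (pt.getD r [] ++ [1])
            else
              pt.insert r (pt.getD r [] ++
                [PySem.List.pyGetD (pt.getD (r - 1) []) (i - 1) 0 +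
                 PySem.List.pyGetD (pt.getD (r - 1) []) i 0])) pt)
        (((PySem.Dict.empty.insert 0 [1]).insert 1 [1, 1]).insert 2 [1, 2, 1])).getD
          (rl - 1 - 1) [] = pasRow ((rl - 1).toNat - 1) := by
      rw [hprev]
      congr 1
      omega
    rw [build_row (rl - 1) h3 _ hprev' k, build_getD (rl - 1) k]
    by_cases hk : k = rl - 1
    · rw [if_pos hk, if_pos (by omega)]
      rw [hk]
    · rw [if_neg hk]
      by_cases hin : 0 ≤ k ∧ k < max 3 (rl - 1)
      · rw [if_pos hin, if_pos (by omega)]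
      · rw [if_neg hin, if_neg (by omega)]
termination_by (rl - 3).toNat
decreasing_by all_goals omega

lemma filter_pyRange_mid (n : Nat) :
    (PySem.List.pyRange 0 ((n : Int) + 1) 1).filter
      (fun j => decide (1 < j ∧ j < (n : Int) + 1 - 1)) = PySem.List.pyRange 2 (n : Int) 1 := by
  match n with
  | 0 => decide
  | 1 => decide
  | (m + 2) =>
    set n := m + 2 with hn
    have h2 : (2 : Int) ≤ (n : Int) := by omega
    rw [PySem.List.pyRange_one_append 0 2 ((n : Int) + 1) (by omega) (by omega),
        PySem.List.pyRange_one_append 2 (n : Int) ((n : Int) + 1) h2 (by omega),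
        List.filter_append, List.filter_append]
    have e1 : (PySem.List.pyRange 0 2 1).filter
        (fun j => decide (1 < j ∧ j < (n : Int) + 1 - 1)) = [] := by
      have : PySem.List.pyRange 0 2 1 = [0, 1] := by decide
      rw [this]
      simp
    have e3 : (PySem.List.pyRange (n : Int) ((n : Int) + 1) 1).filter
        (fun j => decide (1 < j ∧ j < (n : Int) + 1 - 1)) = [] := by
      rw [PySem.List.pyRange_one_singleton]
      simp
    have e2 : (PySem.List.pyRange 2 (n : Int) 1).filter
        (fun j => decide (1 < j ∧ j < (n : Int) + 1 - 1)) = PySem.List.pyRange 2 (n : Int) 1 := by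
      apply List.filter_eq_self.mpr
      intro a ha
      rw [PySem.List.mem_pyRange_one] at ha
      simp
      omega
    rw [e1, e2, e3, List.nil_append, List.append_nil]

lemma row_interior (n : Nat) (nl0 : List Int) :
    ((PySem.List.enumerate (pasRow n)).foldl (fun nl p =>
      if 1 < p.1 ∧ p.1 < PySem.List.len (pasRow n) - 1 then nl ++ [p.2] else nl) nl0) =
    nl0 ++ pvInterior (n : Int) := by
  rw [PySem.List.foldl_append_ite (fun p : Int × Int => 1 < p.1 ∧ p.1 < PySem.List.len (pasRow n) - 1) (fun p => p.2)]
  congr 1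
  rw [PySem.List.enumerate_eq_map_pyRange (pasRow n) 0, List.filter_map, List.map_map]
  have hlen : PySem.List.len (pasRow n) = (n : Int) + 1 := by simp [pasRow]
  rw [hlen]
  have hcomp : ((fun p : Int × Int => decide (1 < p.1 ∧ p.1 < (n : Int) + 1 - 1)) ∘
      (fun j => (j, PySem.List.pyGetD (pasRow n) j 0))) =
      (fun j => decide (1 < j ∧ j < (n : Int) + 1 - 1)) := by
    funext j; rfl
  rw [hcomp, filter_pyRange_mid n]
  rw [pvInterior]
  have ht : ((n : Int)).toNat = n := by omega
  rw [ht]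
  apply List.map_congr_left
  intro j hj
  rw [PySem.List.mem_pyRange_one] at hj
  obtain ⟨m, rfl⟩ : ∃ m : Nat, j = (m : Int) := ⟨j.toNat, by omega⟩
  show PySem.List.pyGetD (pasRow n) (m : Int) 0 = chI n (m : Int)
  rw [PySem.List.pyGetD_natCast, chI]
  have : ((m : Int)).toNat = m := by omega
  rw [this, pasRow_getD n m 0 (by omega)]

lemma number_list_eq (rl : Int) (pt : PySem.Dict Int (List Int))
    (hpt : ∀ k : Int, pt.getD k [] = if 0 ≤ k ∧ k < max 3 rl then pasRow k.toNat else []) :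
    ((PySem.List.pyRange 0 rl 1).foldl (fun nl r =>
      (PySem.List.enumerate (pt.getD r [])).foldl (fun nl p =>
        if 1 < p.1 ∧ p.1 < PySem.List.len (pt.getD r []) - 1 then nl ++ [p.2] else nl) nl) [])
    = pvNums rl := by
  rw [PySem.List.foldl_congr_mem (PySem.List.pyRange 0 rl 1) _ (fun nl r => nl ++ pvInterior r) []]
  · rw [PySem.List.foldl_append_eq_flatMap, List.nil_append, pvNums]
  · intro acc r hr
    rw [PySem.List.mem_pyRange_one] at hr
    have h1 : pt.getD r [] = pasRow r.toNat := by
      rw [hpt r, if_pos ⟨hr.1, by omega⟩]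
    rw [h1, row_interior r.toNat acc]
    congr 1
    congr 1
    omega

-- ===== VERDICT (by name: the statement is the Claim_ definition above) =====
theorem search_pascal_multiples_slow_spec : Claim_equal_search_pascal_multiples_slow := by
  intro rl _
  unfold Spec_search_pascal_multiples_slow
  unfold search_pascal_multiples_slow search_pascal_multiples_slow_alt
  dsimp only []
  rw [number_list_eq rl _ (build_getD rl)]
  simp only [PySem.List.foldl_beq_add_one, zero_add]
  rw [PySem.List.foldl_append_ite_eq_filter (fun u => ((List.count u (pvNums rl) : Int) > 3))]
  rw [PySem.List.foldl_congr_mem (PySem.List.pyRange 0 rl 1) _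
    (fun d r => (pvInterior r).foldl (fun d x => d.insert x (d.getD x 0 + 1)) d)
    PySem.Dict.empty
    (fun d r hr => alt_inner r (by rw [PySem.List.mem_pyRange_one] at hr; omega) d)]
  rw [← List.foldl_flatMap]
  rw [show (PySem.List.pyRange 0 rl 1).flatMap pvInterior = pvNums rl from rfl]
  rw [PySem.Dict.foldl_insert_getD_add_one_eq_counter, PySem.Dict.items_counter]
  rw [List.filter_map, List.map_map]
  simp only [Function.comp_def]
  rw [List.nil_append, List.map_id_fun']
  rfl
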